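-- pv_equiv track=rewrite | github.com/Chekintakathashraf/gfg-code | basic/choclate.py | chocolates
-- ===== SOURCE A (Python) =====
-- def chocolates(arr, n):
--     left = 0
--     right = n - 1
--
--     # Simulate the game until only one square is left
--     while left < right:
--         if arr[left] > arr[right]:
--             left += 1  # Ishaan picks the left square
--         else:
--             right -= 1  # Ishaan picks the right square
--
--     # The last square left will be the sister's square
--     return arr[left]
-- ===== SOURCE B (Python) =====
-- def chocolates(arr, n):
--     m = arr[0]
--     for i in range(1, n):
--         if arr[i] < m:
--             m = arr[i]
--     return m
-- ===== Notes on version B (the rewrite author's own statement) =====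
-- stated objective: simpler
-- what changed: Replaces the two-pointer endpoint-comparison simulation with a single forward running-minimum scan over arr[0:n], since the surviving square is always the minimum of that prefix.
import Mathlib
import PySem

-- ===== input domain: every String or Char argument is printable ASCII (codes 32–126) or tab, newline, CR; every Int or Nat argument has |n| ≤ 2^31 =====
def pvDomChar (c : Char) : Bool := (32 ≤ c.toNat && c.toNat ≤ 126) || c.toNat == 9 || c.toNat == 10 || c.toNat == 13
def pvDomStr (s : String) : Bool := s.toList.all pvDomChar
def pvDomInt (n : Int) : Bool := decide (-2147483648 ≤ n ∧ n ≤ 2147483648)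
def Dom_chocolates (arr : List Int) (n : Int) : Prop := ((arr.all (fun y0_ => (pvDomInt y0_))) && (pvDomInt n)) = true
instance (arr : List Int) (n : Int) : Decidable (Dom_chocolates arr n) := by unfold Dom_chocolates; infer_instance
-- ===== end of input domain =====

-- B replaces A's two-pointer endpoint-comparison simulation by a single forward
-- running-minimum scan over arr[0:n] (the surviving square is the prefix minimum); simpler.


-- ===== PORT A =====
-- the while-loop of A; arr[i] ported with pyGet? (none = IndexError, excluded by Pre_)
def chocoLoop (arr : List Int) (left right : Int) : Int :=
  if left < right then
    if (PySem.List.pyGet? arr left).getD 0 > (PySem.List.pyGet? arr right).getD 0 then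
      chocoLoop arr (left + 1) right
    else
      chocoLoop arr left (right - 1)
  else
    (PySem.List.pyGet? arr left).getD 0
termination_by (right - left).toNat
decreasing_by all_goals omega

def chocolates (arr : List Int) (n : Int) : Int :=
  chocoLoop arr 0 (n - 1)

-- ===== PORT B =====
def chocolates_alt (arr : List Int) (n : Int) : Int :=
  (PySem.List.pyRange 1 n 1).foldl
    (fun m i => if (PySem.List.pyGet? arr i).getD 0 < m then (PySem.List.pyGet? arr i).getD 0 else m)
    ((PySem.List.pyGet? arr 0).getD 0)

-- ===== PRECONDITION & SPEC =====
-- Pre_ excludes exactly the inputs where A raises IndexError: empty arr (n<=0 path reads arr[0])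
-- and n > len(arr) (the loop reads arr[n-1]).
def Pre_chocolates (arr : List Int) (n : Int) : Prop :=
  arr ≠ [] ∧ n ≤ arr.length

instance (arr : List Int) (n : Int) : Decidable (Pre_chocolates arr n) := by
  unfold Pre_chocolates; infer_instance

def pvWitness_chocolates : List Int × Int := ([3, 1, 2], 3)

def Spec_chocolates (arr : List Int) (n : Int) (out : Int) : Prop := out = chocolates_alt arr n
instance (arr : List Int) (n : Int) (out : Int) : Decidable (Spec_chocolates arr n out) := by unfold Spec_chocolates; infer_instance

-- ===== CLAIM (what is proved, stated in full; the proofs are below) =====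
def Claim_equal_chocolates : Prop := ∀ (arr : List Int) (n : Int), Dom_chocolates arr n → Pre_chocolates arr n → Spec_chocolates arr n (chocolates arr n)

-- ===== LEMMAS AND PROOFS =====

-- abbreviation used only in proofs: the value Python's arr[i] yields
def gAt (arr : List Int) (i : Int) : Int := (PySem.List.pyGet? arr i).getD 0

-- B's fold step is min
lemma step_eq_min (arr : List Int) (m i : Int) :
    (if (PySem.List.pyGet? arr i).getD 0 < m then (PySem.List.pyGet? arr i).getD 0 else m)
      = min m (gAt arr i) := by
  simp [gAt, min_def]; omega

lemma foldl_step_eq_min (arr : List Int) (l : List Int) (s : Int) :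
    l.foldl (fun m i => if (PySem.List.pyGet? arr i).getD 0 < m then (PySem.List.pyGet? arr i).getD 0 else m) s
      = (l.map (gAt arr)).foldl min s := by
  have hfun : (fun (m i : Int) => if (PySem.List.pyGet? arr i).getD 0 < m then (PySem.List.pyGet? arr i).getD 0 else m)
      = fun m i => min m (gAt arr i) := funext fun m => funext fun i => step_eq_min arr m i
  rw [hfun, List.foldl_map]

lemma foldl_min_le_seed (vs : List Int) (s : Int) : vs.foldl min s ≤ s := by
  induction vs generalizing s with
  | nil => simp
  | cons x xs ih => exact le_trans (ih (min s x)) (min_le_left _ _)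

-- a seed component b can be dropped if some element y < b occurs in the list
lemma foldl_min_drop (vs : List Int) (a b y : Int) (hmem : y ∈ vs) (hy : y < b) :
    vs.foldl min (min b a) = vs.foldl min a := by
  induction vs generalizing a with
  | nil => cases hmem
  | cons x xs ih =>
    simp only [List.foldl]
    rcases List.mem_cons.mp hmem with h | h
    · have h2 : min (min b a) x = min a x := by subst h; omega
      rw [h2]
    · rw [min_assoc b a x, ih (min a x) h]

-- core: the two-pointer loop computes the running minimum over indices l..r
lemma chocoLoop_eq_fold (arr : List Int) :
    ∀ (k : Nat) (l r : Int), (r - l).toNat = k → l ≤ r →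
    chocoLoop arr l r = ((PySem.List.pyRange (l+1) (r+1) 1).map (gAt arr)).foldl min (gAt arr l) := by
  intro k
  induction k with
  | zero =>
    intro l r hk hlr
    have hlr' : l = r := by omega
    subst hlr'
    rw [chocoLoop, if_neg (lt_irrefl l), PySem.List.pyRange_one_eq_nil (by omega)]
    rfl
  | succ k ih =>
    intro l r hk hlr
    have hltr : l < r := by omega
    rw [chocoLoop, if_pos hltr]
    by_cases hcmp : (PySem.List.pyGet? arr l).getD 0 > (PySem.List.pyGet? arr r).getD 0
    · rw [if_pos hcmp]
      rw [ih (l+1) r (by omega) (by omega)]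
      rw [PySem.List.pyRange_one_cons (by omega : (l+1 : Int) < r+1), List.map_cons, List.foldl_cons]
      by_cases hr2 : l + 2 ≤ r
      · exact (foldl_min_drop _ (gAt arr (l+1)) (gAt arr l) (gAt arr r)
          (List.mem_map_of_mem (PySem.List.mem_pyRange_one.mpr (by omega)))
          (by simpa [gAt] using hcmp)).symm
      · have hre : r = l + 1 := by omega
        subst hre
        rw [PySem.List.pyRange_one_eq_nil (by omega)]
        simp only [List.map_nil, List.foldl_nil, gAt]
        omega
    · rw [if_neg hcmp]
      rw [ih l (r-1) (by omega) (by omega)]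
      have hsr : PySem.List.pyRange (l+1) (r+1) 1 = PySem.List.pyRange (l+1) r 1 ++ [r] := by
        have := PySem.List.pyRange_one_succ_right (a := l+1) (b := r) (by omega)
        simpa using this
      rw [hsr, List.map_append, List.foldl_append]
      have h1 : ((PySem.List.pyRange (l+1) (r-1+1) 1).map (gAt arr)).foldl min (gAt arr l)
              = ((PySem.List.pyRange (l+1) r 1).map (gAt arr)).foldl min (gAt arr l) := by
        norm_num
      rw [h1]
      have hle : ((PySem.List.pyRange (l+1) r 1).map (gAt arr)).foldl min (gAt arr l) ≤ gAt arr l :=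
        foldl_min_le_seed _ _
      have hlr2 : gAt arr l ≤ gAt arr r := by
        simp only [gAt]; omega
      simp only [List.map_cons, List.map_nil, List.foldl_cons, List.foldl_nil]
      omega

-- ===== VERDICT (by name: the statement is the Claim_ definition above) =====
theorem chocolates_spec : Claim_equal_chocolates := by
  intro arr n _ _
  unfold Spec_chocolates chocolates chocolates_alt
  rw [foldl_step_eq_min]
  by_cases h2 : 2 ≤ n
  · have h := chocoLoop_eq_fold arr (n-1).toNat 0 (n-1) (by omega) (by omega)
    simpa [gAt, show (0:Int) + 1 = 1 from rfl, show n - 1 + 1 = n from by ring] using h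
  · rw [chocoLoop, if_neg (by omega), PySem.List.pyRange_one_eq_nil (by omega)]
    rfl
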